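-- pv_equiv track=rewrite | github.com/baites/examples | coding/fb/reverse_to_make_equal.py | precompute
-- ===== SOURCE A (Python) =====
-- def precompute(array_a, array_b):
--
--   size = len(array_a)
--
--   E = [[False]*(size-i) for i in range(size)]
--   R = [[False]*(size-i) for i in range(size)]
--
--   for d in range(size):
--     for s in range(size-d):
--       if d in (0, 1):
--         prevE = True
--         prevR = True
--       else:
--         prevE = E[s+1][d-2]
--         prevR = R[s+1][d-2]
--
--       E[s][d] = prevE and \
--         array_a[s] == array_b[s] and array_a[s+d] == array_b[s+d]
--       R[s][d] = prevR and (\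
--          array_a[s] == array_b[s+d] and array_a[s+d] == array_b[s] or\
--          array_a[s] == array_b[s] and array_a[s+d] == array_b[s+d]
--       )
--
--   return E, R
-- ===== SOURCE B (Python) =====
-- def precompute(array_a, array_b):
--
--   n = len(array_a)
--
--   def pair(l, r):
--     return (array_a[l] == array_b[r] and array_a[r] == array_b[l]) or \
--            (array_a[l] == array_b[l] and array_a[r] == array_b[r])
--
--   E = [[all(array_a[s + j] == array_b[s + j] for j in range(d + 1))
--         for d in range(n - s)] for s in range(n)]
--   R = [[all(pair(s + j, s + d - j) for j in range(d // 2 + 1))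
--         for d in range(n - s)] for s in range(n)]
--   return E, R
-- ===== Notes on version B (the rewrite author's own statement) =====
-- stated objective: simpler
-- what changed: A fills E and R by diagonal dynamic programming (each cell from the cell two diagonals below); B defines each cell directly - E[s][d] as 'all positions of the span match' and R[s][d] as 'every outside-in pair of the span matches straight or crossed' - as plain comprehensions with no table recurrence.
import Mathlib
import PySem

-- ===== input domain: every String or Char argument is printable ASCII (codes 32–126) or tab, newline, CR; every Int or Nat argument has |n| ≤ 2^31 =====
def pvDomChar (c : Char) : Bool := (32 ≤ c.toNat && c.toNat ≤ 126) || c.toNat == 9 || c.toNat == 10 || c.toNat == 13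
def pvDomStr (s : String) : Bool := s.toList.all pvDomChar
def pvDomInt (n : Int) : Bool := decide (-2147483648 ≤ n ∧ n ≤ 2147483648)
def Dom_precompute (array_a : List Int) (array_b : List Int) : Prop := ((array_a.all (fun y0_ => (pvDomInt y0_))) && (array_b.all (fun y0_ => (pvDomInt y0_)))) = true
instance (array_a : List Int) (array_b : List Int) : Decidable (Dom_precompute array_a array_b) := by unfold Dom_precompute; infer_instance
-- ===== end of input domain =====

-- B replaces A's diagonal dynamic programming (each cell from the cell two diagonals
-- below) by a direct per-cell definition: E[s][d] says all positions of the span match,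
-- R[s][d] says every outside-in pair of the span matches straight or crossed (alternative,
-- not faster).

-- ===== PORT A =====
-- Python 'E[s][d] = v' on nested lists; indices produced by A are always in range,
-- so the getD defaults are never consulted and this transliterates Python indexing exactly.
def pvSetCell (M : List (List Bool)) (s d : Nat) (v : Bool) : List (List Bool) :=
  M.set s ((M.getD s []).set d v)

def precompute (array_a : List Int) (array_b : List Int) : List (List Bool) × List (List Bool) :=
  let size := array_a.length
  let E0 : List (List Bool) := (List.range size).map (fun i => List.replicate (size - i) false)
  let R0 : List (List Bool) := (List.range size).map (fun i => List.replicate (size - i) false)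
  (List.range size).foldl (fun ER d =>
    (List.range (size - d)).foldl (fun ER s =>
      let E := ER.1
      let R := ER.2
      let prevE := if d = 0 ∨ d = 1 then true else (E.getD (s+1) []).getD (d-2) false
      let prevR := if d = 0 ∨ d = 1 then true else (R.getD (s+1) []).getD (d-2) false
      let e := prevE && (array_a.getD s 0 == array_b.getD s 0) &&
        (array_a.getD (s+d) 0 == array_b.getD (s+d) 0)
      let r := prevR && (((array_a.getD s 0 == array_b.getD (s+d) 0) &&
          (array_a.getD (s+d) 0 == array_b.getD s 0)) ||
        ((array_a.getD s 0 == array_b.getD s 0) &&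
          (array_a.getD (s+d) 0 == array_b.getD (s+d) 0)))
      (pvSetCell E s d e, pvSetCell R s d r)) ER) (E0, R0)

-- ===== PORT B =====
def pvEq (a b : List Int) (k : Nat) : Bool := a.getD k 0 == b.getD k 0

def pvPair (a b : List Int) (l r : Nat) : Bool :=
  ((a.getD l 0 == b.getD r 0) && (a.getD r 0 == b.getD l 0)) ||
  ((a.getD l 0 == b.getD l 0) && (a.getD r 0 == b.getD r 0))

def precompute_alt (array_a : List Int) (array_b : List Int) : List (List Bool) × List (List Bool) :=
  let n := array_a.length
  ((List.range n).map (fun s => (List.range (n - s)).map (fun d =>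
      (List.range (d + 1)).all (fun j => pvEq array_a array_b (s + j)))),
   (List.range n).map (fun s => (List.range (n - s)).map (fun d =>
      (List.range (d / 2 + 1)).all (fun j => pvPair array_a array_b (s + j) (s + d - j)))))

-- ===== PRECONDITION & SPEC =====
-- A (and B) index array_b at every position of array_a, so both raise IndexError
-- when array_b is shorter than array_a; Pre_ excludes exactly those inputs.
def Pre_precompute (array_a : List Int) (array_b : List Int) : Prop :=
  array_a.length ≤ array_b.length
instance (array_a : List Int) (array_b : List Int) : Decidable (Pre_precompute array_a array_b) := by unfold Pre_precompute; infer_instance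
def pvWitness_precompute : List Int × List Int := ([1, 2, 1], [1, 3, 1])

def Spec_precompute (array_a : List Int) (array_b : List Int) (out : List (List Bool) × List (List Bool)) : Prop := out = precompute_alt array_a array_b
instance (array_a : List Int) (array_b : List Int) (out : List (List Bool) × List (List Bool)) : Decidable (Spec_precompute array_a array_b out) := by unfold Spec_precompute; infer_instance

-- ===== CLAIM (what is proved, stated in full; the proofs are below) =====
def Claim_equal_precompute : Prop := ∀ (array_a : List Int) (array_b : List Int), Dom_precompute array_a array_b → Pre_precompute array_a array_b → Spec_precompute array_a array_b (precompute array_a array_b)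

-- ===== LEMMAS AND PROOFS =====

-- the value stored at row s, column d (false when out of range; tables stay in range)
def pvCell (M : List (List Bool)) (s d : Nat) : Bool := (M.getD s []).getD d false

-- B's cell formulas
def pvSpecE (a b : List Int) (s d : Nat) : Bool :=
  (List.range (d + 1)).all (fun j => pvEq a b (s + j))
def pvSpecR (a b : List Int) (s d : Nat) : Bool :=
  (List.range (d / 2 + 1)).all (fun j => pvPair a b (s + j) (s + d - j))

def pvShape (n : Nat) (M : List (List Bool)) : Prop :=
  M.length = n ∧ ∀ s, (M.getD s []).length = n - s

theorem pvShape_setCell {n : Nat} {M : List (List Bool)} (h : pvShape n M) (s d : Nat) (v : Bool) :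
    pvShape n (pvSetCell M s d v) := by
  obtain ⟨h1, h2⟩ := h
  simp only [List.getD] at h2
  refine ⟨by simp [pvSetCell, h1], fun s' => ?_⟩
  simp only [List.getD]
  by_cases hs : s' = s
  · subst hs
    by_cases hlt : s' < M.length
    · simp [pvSetCell, List.getElem?_set_self hlt, h2 s']
    · rw [pvSetCell, List.set_eq_of_length_le (by omega)]
      exact h2 s'
  · simp [pvSetCell, List.getElem?_set_ne (fun h => hs h.symm)]
    exact h2 s'

theorem pvCell_setCell_self {n : Nat} {M : List (List Bool)} (h : pvShape n M)
    {s d : Nat} (hsd : s + d < n) (v : Bool) : pvCell (pvSetCell M s d v) s d = v := by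
  obtain ⟨h1, h2⟩ := h
  simp only [List.getD] at h2
  have hs : s < M.length := by omega
  have hd : d < (M[s]?.getD []).length := by rw [h2 s]; omega
  simp [pvCell, pvSetCell, List.getD, List.getElem?_set_self hs,
    List.getElem?_set_self hd]

theorem pvCell_setCell_ne {M : List (List Bool)} {s d s' d' : Nat}
    (h : s' ≠ s ∨ d' ≠ d) (v : Bool) : pvCell (pvSetCell M s d v) s' d' = pvCell M s' d' := by
  rcases h with h | h
  · simp [pvCell, pvSetCell, List.getD, List.getElem?_set_ne (fun hh => h hh.symm)]
  · by_cases hs : s' = s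
    · subst hs
      by_cases hlt : s' < M.length
      · simp [pvCell, pvSetCell, List.getD, List.getElem?_set_self hlt,
          List.getElem?_set_ne (fun hh => h hh.symm)]
      · rw [pvCell, pvCell, pvSetCell, List.set_eq_of_length_le (by omega)]
    · simp [pvCell, pvSetCell, List.getD, List.getElem?_set_ne (fun hh => hs hh.symm)]

-- inner loop invariant, for an abstract step that writes the recurrence value at (s, d)
theorem pvInner {n d : Nat} {cond spec : Nat → Nat → Bool}
    {step : List (List Bool) → Nat → List (List Bool)}
    (hstep : ∀ M s, step M s =
      pvSetCell M s d ((if d = 0 ∨ d = 1 then true else pvCell M (s+1) (d-2)) && cond s d))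
    (hrec : ∀ s, spec s d = ((if d = 0 ∨ d = 1 then true else spec (s+1) (d-2)) && cond s d)) :
    ∀ (m k : Nat) (M : List (List Bool)), k + m = n - d → pvShape n M →
    (∀ s d', s + d' < n → (d' < d ∨ (d' = d ∧ s < k)) → pvCell M s d' = spec s d') →
    pvShape n ((List.range' k m).foldl step M) ∧
      (∀ s d', s + d' < n → (d' < d ∨ (d' = d ∧ s < k + m)) →
        pvCell ((List.range' k m).foldl step M) s d' = spec s d') := by
  intro m
  induction m with
  | zero => intro k M hkm hSh hInv; simpa using ⟨hSh, hInv⟩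
  | succ m ih =>
    intro k M hkm hSh hInv
    have hkd : k + d < n := by omega
    have hval : ((if d = 0 ∨ d = 1 then true else pvCell M (k+1) (d-2)) && cond k d)
        = spec k d := by
      rw [hrec k]
      by_cases hd : d = 0 ∨ d = 1
      · simp [hd]
      · have hd2 : d - 2 < d := by omega
        have : pvCell M (k+1) (d-2) = spec (k+1) (d-2) :=
          hInv (k+1) (d-2) (by omega) (Or.inl hd2)
        simp [hd, this]
    have hstep' : step M k = pvSetCell M k d (spec k d) := by rw [hstep, hval]
    have hSh' : pvShape n (pvSetCell M k d (spec k d)) := pvShape_setCell hSh k d _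
    have hInv' : ∀ s d', s + d' < n → (d' < d ∨ (d' = d ∧ s < k + 1)) →
        pvCell (pvSetCell M k d (spec k d)) s d' = spec s d' := by
      intro s d' hsd hcase
      by_cases hsame : s = k ∧ d' = d
      · obtain ⟨rfl, rfl⟩ := hsame
        exact pvCell_setCell_self hSh hsd _
      · have hne : s ≠ k ∨ d' ≠ d := by tauto
        rw [pvCell_setCell_ne hne]
        apply hInv s d' hsd
        rcases hcase with h | ⟨rfl, hlt⟩
        · exact Or.inl h
        · exact Or.inr ⟨rfl, by omega⟩
    have := ih (k+1) (pvSetCell M k d (spec k d)) (by omega) hSh' hInv'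
    rw [List.range'_succ]
    simpa [hstep', Nat.add_assoc, Nat.add_comm, Nat.add_left_comm] using this

-- outer loop invariant
theorem pvOuter {n : Nat} {cond spec : Nat → Nat → Bool}
    {step : Nat → List (List Bool) → Nat → List (List Bool)}
    (hstep : ∀ d M s, step d M s =
      pvSetCell M s d ((if d = 0 ∨ d = 1 then true else pvCell M (s+1) (d-2)) && cond s d))
    (hrec : ∀ s d, spec s d = ((if d = 0 ∨ d = 1 then true else spec (s+1) (d-2)) && cond s d)) :
    ∀ (m k : Nat) (M : List (List Bool)), k + m = n → pvShape n M →
    (∀ s d', s + d' < n → d' < k → pvCell M s d' = spec s d') →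
    pvShape n ((List.range' k m).foldl
        (fun M d => (List.range (n - d)).foldl (step d) M) M) ∧
      (∀ s d', s + d' < n → d' < k + m →
        pvCell ((List.range' k m).foldl
          (fun M d => (List.range (n - d)).foldl (step d) M) M) s d' = spec s d') := by
  intro m
  induction m with
  | zero => intro k M hkm hSh hInv; simpa using ⟨hSh, hInv⟩
  | succ m ih =>
    intro k M hkm hSh hInv
    have hin := pvInner (n := n) (d := k) (cond := cond) (spec := spec)
      (hstep k) (fun s => hrec s k)
      (n - k) 0 M (by omega) hSh (by intro s d' h1 h2; exact hInv s d' h1 (by omega))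
    rw [← List.range_eq_range'] at hin
    have hInv2 : ∀ s d', s + d' < n → d' < k + 1 →
        pvCell ((List.range (n - k)).foldl (step k) M) s d' = spec s d' := by
      intro s d' h1 h2
      apply hin.2 s d' h1
      by_cases hdk : d' = k
      · exact Or.inr ⟨hdk, by omega⟩
      · exact Or.inl (by omega)
    have := ih (k+1) ((List.range (n - k)).foldl (step k) M) (by omega) hin.1 hInv2
    rw [List.range'_succ]
    simpa [Nat.add_assoc, Nat.add_comm, Nat.add_left_comm] using this

-- splitting a fold on pairs whose step is componentwise
theorem pvFoldPair {α β ι : Type} (f : α → ι → α) (g : β → ι → β) :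
    ∀ (l : List ι) (x : α) (y : β),
      l.foldl (fun p i => (f p.1 i, g p.2 i)) (x, y) = (l.foldl f x, l.foldl g y) := by
  intro l
  induction l with
  | nil => intro x y; rfl
  | cons i l ih => intro x y; simp [List.foldl_cons, ih]

-- splitting a nested fold on pairs whose inner step is componentwise
theorem pvFoldPair2 {α β : Type} (f : Nat → α → Nat → α) (g : Nat → β → Nat → β)
    (inner : Nat → List Nat) :
    ∀ (l : List Nat) (x : α) (y : β),
      l.foldl (fun p d => (inner d).foldl (fun p s => (f d p.1 s, g d p.2 s)) p) (x, y) =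
        (l.foldl (fun M d => (inner d).foldl (f d) M) x,
         l.foldl (fun M d => (inner d).foldl (g d) M) y) := by
  intro l
  induction l with
  | nil => intro x y; rfl
  | cons d l ih =>
    intro x y
    simp only [List.foldl_cons]
    rw [show (inner d).foldl (fun p s => (f d p.1 s, g d p.2 s)) (x, y) =
        ((inner d).foldl (f d) x, (inner d).foldl (g d) y) from pvFoldPair (f d) (g d) _ x y]
    exact ih _ _

-- recurrence for B's E formula
theorem pvSpecE_rec (a b : List Int) (s d : Nat) :
    pvSpecE a b s d = ((if d = 0 ∨ d = 1 then true else pvSpecE a b (s+1) (d-2)) &&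
      (pvEq a b s && pvEq a b (s + d))) := by
  rw [Bool.eq_iff_iff]
  simp only [pvSpecE, List.all_eq_true, List.mem_range, Bool.and_eq_true]
  by_cases hd : d = 0 ∨ d = 1
  · rcases hd with rfl | rfl
    · constructor
      · intro h; exact ⟨by simp, by simpa using h 0 (by omega), by simpa using h 0 (by omega)⟩
      · intro ⟨_, h1, _⟩ j hj
        have : j = 0 := by omega
        simpa [this] using h1
    · constructor
      · intro h
        exact ⟨by simp, by simpa using h 0 (by omega), by simpa using h 1 (by omega)⟩
      · intro ⟨_, h1, h2⟩ j hj
        interval_cases j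
        · simpa using h1
        · simpa using h2
  · simp only [if_neg hd, List.all_eq_true, List.mem_range, Bool.and_eq_true, true_and]
    constructor
    · intro h
      refine ⟨fun j hj => ?_, by simpa using h 0 (by omega), h d (by omega)⟩
      have : s + 1 + j = s + (j + 1) := by omega
      rw [this]; exact h (j + 1) (by omega)
    · intro ⟨hin, h0, hd'⟩ j hj
      by_cases hj0 : j = 0
      · simpa [hj0] using h0
      · by_cases hjd : j = d
        · simpa [hjd] using hd'
        · have : s + j = s + 1 + (j - 1) := by omega
          rw [this]; exact hin (j - 1) (by omega)

-- recurrence for B's R formula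
theorem pvSpecR_rec (a b : List Int) (s d : Nat) :
    pvSpecR a b s d = ((if d = 0 ∨ d = 1 then true else pvSpecR a b (s+1) (d-2)) &&
      pvPair a b s (s + d)) := by
  rw [Bool.eq_iff_iff]
  simp only [pvSpecR, List.all_eq_true, List.mem_range, Bool.and_eq_true]
  by_cases hd : d = 0 ∨ d = 1
  · have hh : d / 2 = 0 := by rcases hd with rfl | rfl <;> decide
    constructor
    · intro h
      refine ⟨by simp [hd], ?_⟩
      have := h 0 (by omega)
      simpa using this
    · intro ⟨_, h⟩ j hj
      have : j = 0 := by omega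
      subst this; simpa using h
  · simp only [if_neg hd, List.all_eq_true, List.mem_range, true_and]
    constructor
    · intro h
      refine ⟨fun j hj => ?_, by simpa using h 0 (by omega)⟩
      have e1 : s + 1 + j = s + (j + 1) := by omega
      have e2 : s + 1 + (d - 2) - j = s + d - (j + 1) := by omega
      rw [e1, e2]; exact h (j + 1) (by omega)
    · intro ⟨hin, h0⟩ j hj
      by_cases hj0 : j = 0
      · simpa [hj0] using h0
      · have e1 : s + j = s + 1 + (j - 1) := by omega
        have e2 : s + d - j = s + 1 + (d - 2) - (j - 1) := by omega
        rw [e1, e2]; exact hin (j - 1) (by omega)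

-- the initial table has the right shape
theorem pvShape_init (n : Nat) :
    pvShape n ((List.range n).map (fun i => List.replicate (n - i) false)) := by
  refine ⟨by simp, fun s => ?_⟩
  by_cases hs : s < n
  · simp [List.getD, List.getElem?_map, List.getElem?_range, hs]
  · have hnone : ((List.range n).map (fun i => List.replicate (n - i) false))[s]? = none :=
      List.getElem?_eq_none (by simp; omega)
    simp [List.getD, hnone]
    omega

-- B's tables have the right shape
theorem pvShape_alt (f : Nat → Nat → Bool) (n : Nat) :
    pvShape n ((List.range n).map (fun s => (List.range (n - s)).map (fun d => f s d))) := by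
  refine ⟨by simp, fun s => ?_⟩
  by_cases hs : s < n
  · simp [List.getD, List.getElem?_map, List.getElem?_range, hs]
  · have hnone :
        ((List.range n).map (fun s => (List.range (n - s)).map (fun d => f s d)))[s]? = none :=
      List.getElem?_eq_none (by simp; omega)
    simp [List.getD, hnone]
    omega

-- two tables of the same shape with equal cells are equal
theorem pvTable_ext {n : Nat} {M N : List (List Bool)}
    (hM : pvShape n M) (hN : pvShape n N)
    (h : ∀ s d, s + d < n → pvCell M s d = pvCell N s d) : M = N := by
  obtain ⟨hM1, hM2⟩ := hM
  obtain ⟨hN1, hN2⟩ := hN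
  apply List.ext_getElem (by omega)
  intro s hs _
  have hsn : s < n := by omega
  have hrowM : M.getD s [] = M[s] := List.getD_eq_getElem M [] hs
  have hrowN : N.getD s [] = N[s] := List.getD_eq_getElem N [] (by omega)
  apply List.ext_getElem
  · rw [← hrowM, ← hrowN, hM2, hN2]
  · intro d hd _
    have hdn : s + d < n := by rw [← hrowM, hM2] at hd; omega
    have := h s d hdn
    rw [pvCell, pvCell, hrowM, hrowN] at this
    rwa [List.getD_eq_getElem _ false hd, List.getD_eq_getElem _ false] at this

-- B's table seen through pvCell
theorem pvCell_alt (f : Nat → Nat → Bool) (n s d : Nat) (h : s + d < n) :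
    pvCell ((List.range n).map (fun s => (List.range (n - s)).map (fun d => f s d))) s d
      = f s d := by
  have hs : s < n := by omega
  simp [pvCell, List.getD, List.getElem?_map, List.getElem?_range, hs, (by omega : d < n - s)]

-- ===== VERDICT (by name: the statement is the Claim_ definition above) =====
theorem precompute_spec : Claim_equal_precompute := by
  intro a b _ _
  unfold Spec_precompute
  simp only [precompute, precompute_alt]
  refine Eq.trans
    (pvFoldPair2
      (fun d M s => pvSetCell M s d
        ((if d = 0 ∨ d = 1 then true else (M.getD (s+1) []).getD (d-2) false) &&
          (a.getD s 0 == b.getD s 0) && (a.getD (s+d) 0 == b.getD (s+d) 0)))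
      (fun d M s => pvSetCell M s d
        ((if d = 0 ∨ d = 1 then true else (M.getD (s+1) []).getD (d-2) false) &&
          (((a.getD s 0 == b.getD (s+d) 0) && (a.getD (s+d) 0 == b.getD s 0)) ||
            ((a.getD s 0 == b.getD s 0) && (a.getD (s+d) 0 == b.getD (s+d) 0)))))
      (fun d => List.range (a.length - d)) (List.range a.length) _ _) ?_
  have hE := pvOuter (n := a.length)
    (cond := fun s d => pvEq a b s && pvEq a b (s + d)) (spec := pvSpecE a b)
    (step := fun d M s => pvSetCell M s d
      ((if d = 0 ∨ d = 1 then true else (M.getD (s+1) []).getD (d-2) false) &&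
        (a.getD s 0 == b.getD s 0) && (a.getD (s+d) 0 == b.getD (s+d) 0)))
    (by intro d M s; simp [pvCell, pvEq, Bool.and_assoc])
    (fun s d => pvSpecE_rec a b s d) a.length 0
    ((List.range a.length).map (fun i => List.replicate (a.length - i) false)) (by omega)
    (pvShape_init a.length) (by intro s d' _ h; omega)
  have hR := pvOuter (n := a.length)
    (cond := fun s d => pvPair a b s (s + d)) (spec := pvSpecR a b)
    (step := fun d M s => pvSetCell M s d
      ((if d = 0 ∨ d = 1 then true else (M.getD (s+1) []).getD (d-2) false) &&
        (((a.getD s 0 == b.getD (s+d) 0) && (a.getD (s+d) 0 == b.getD s 0)) ||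
          ((a.getD s 0 == b.getD s 0) && (a.getD (s+d) 0 == b.getD (s+d) 0)))))
    (by intro d M s; simp [pvCell, pvPair])
    (fun s d => pvSpecR_rec a b s d) a.length 0
    ((List.range a.length).map (fun i => List.replicate (a.length - i) false)) (by omega)
    (pvShape_init a.length) (by intro s d' _ h; omega)
  rw [← List.range_eq_range'] at hE hR
  simp only [Prod.mk.injEq]
  constructor
  · exact pvTable_ext hE.1
      (pvShape_alt (fun s d => (List.range (d + 1)).all (fun j => pvEq a b (s + j))) a.length)
      (fun s d h => by
        rw [hE.2 s d h (by omega),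
          pvCell_alt (fun s d => (List.range (d + 1)).all (fun j => pvEq a b (s + j)))
            a.length s d h]
        rfl)
  · exact pvTable_ext hR.1
      (pvShape_alt (fun s d =>
        (List.range (d / 2 + 1)).all (fun j => pvPair a b (s + j) (s + d - j))) a.length)
      (fun s d h => by
        rw [hR.2 s d h (by omega),
          pvCell_alt (fun s d =>
            (List.range (d / 2 + 1)).all (fun j => pvPair a b (s + j) (s + d - j)))
            a.length s d h]
        rfl)
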